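-- pv_equiv track=rewrite | github.com/zayzyyazy/job-pipeline | services/target_fit.py | _collect_matches
-- ===== SOURCE A (Python) =====
-- from typing import Any, Dict, List, Tuple
--
-- def _collect_matches(text: str, terms: List[Tuple[str, int]]) -> Tuple[int, List[str]]:
--     score = 0
--     matched: List[str] = []
--     for phrase, weight in terms:
--         if phrase in text:
--             score += weight
--             matched.append(phrase)
--     return score, matched
-- ===== SOURCE B (Python) =====
-- def _collect_matches(text, terms):
--     # One pass over the text per distinct phrase length: precompute the set of
--     # all substrings of those lengths, then answer every membership query by a
--     # hash lookup instead of a separate substring scan per phrase.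
--     lengths = dict.fromkeys(len(p) for p, _ in terms)
--     subs = {text[i:i + L] for L in lengths for i in range(len(text) - L + 1)}
--     score = sum(w for p, w in terms if p in subs)
--     matched = [p for p, _ in terms if p in subs]
--     return score, matched
-- ===== Notes on version B (the rewrite author's own statement) =====
-- stated objective: alternative
-- what changed: Instead of running a separate substring search per phrase, B precomputes the set of all substrings of the text whose length is a phrase length (one slice pass per distinct length) and answers each phrase by a set lookup.
import Mathlib
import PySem

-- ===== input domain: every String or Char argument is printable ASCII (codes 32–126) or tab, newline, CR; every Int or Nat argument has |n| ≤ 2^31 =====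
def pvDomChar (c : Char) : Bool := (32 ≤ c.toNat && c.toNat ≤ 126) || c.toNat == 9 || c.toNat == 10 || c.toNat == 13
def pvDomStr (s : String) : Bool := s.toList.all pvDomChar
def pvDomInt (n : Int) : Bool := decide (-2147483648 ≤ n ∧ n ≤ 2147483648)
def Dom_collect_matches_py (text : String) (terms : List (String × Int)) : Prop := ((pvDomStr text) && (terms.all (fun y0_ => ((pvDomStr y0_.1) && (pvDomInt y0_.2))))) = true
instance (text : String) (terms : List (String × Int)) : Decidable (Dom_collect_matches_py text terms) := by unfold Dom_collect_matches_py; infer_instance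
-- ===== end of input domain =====

-- B precomputes the set of all substrings of the text of the occurring phrase lengths,
-- then answers each phrase by a set lookup instead of a substring search per phrase.

-- ===== PORT A =====
def collect_matches_py (text : String) (terms : List (String × Int)) : Int × List String :=
  terms.foldl
    (fun st t =>
      if PySem.Str.isIn t.1 text then (st.1 + t.2, st.2 ++ [t.1]) else st)
    (0, [])

-- ===== PORT B =====
def collect_matches_py_alt (text : String) (terms : List (String × Int)) : Int × List String :=
  let lengths : List Nat := PySem.List.dedup (terms.map (fun t => t.1.length))
  let subs : PySem.Set String := PySem.Set.ofList (lengths.flatMap (fun (L : Nat) =>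
    (PySem.List.pyRange 0 ((text.length : Int) - (L : Int) + 1) 1).map
      (fun i => PySem.Str.slice text (some i) (some (i + (L : Int))))))
  let score : Int := (terms.filter (fun t => subs.contains t.1)).foldl (fun a t => a + t.2) 0
  let matched : List String := (terms.filter (fun t => subs.contains t.1)).map (fun t => t.1)
  (score, matched)

-- ===== PRECONDITION & SPEC =====
def Spec_collect_matches_py (text : String) (terms : List (String × Int)) (out : Int × List String) : Prop := out = collect_matches_py_alt text terms
instance (text : String) (terms : List (String × Int)) (out : Int × List String) : Decidable (Spec_collect_matches_py text terms out) := by unfold Spec_collect_matches_py; infer_instance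

-- ===== CLAIM (what is proved, stated in full; the proofs are below) =====
def Claim_equal_collect_matches_py : Prop := ∀ (text : String) (terms : List (String × Int)), Dom_collect_matches_py text terms → Spec_collect_matches_py text terms (collect_matches_py text terms)

-- ===== LEMMAS AND PROOFS =====

-- shift of the running sum
theorem pv_foldl_add_shift (l : List (String × Int)) (c : Int) :
    l.foldl (fun a t => a + t.2) c = c + l.foldl (fun a t => a + t.2) 0 := by
  induction l generalizing c with
  | nil => simp
  | cons h tl ih =>
    simp only [List.foldl_cons]
    rw [ih (c + h.2), ih (0 + h.2)]
    ring

-- A's single fold equals (sum of filtered weights, phrases of filtered)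
theorem pv_foldA (q : String × Int → Bool) (l : List (String × Int)) (s : Int) (m : List String) :
    l.foldl (fun st t => if q t then (st.1 + t.2, st.2 ++ [t.1]) else st) (s, m)
      = (s + (l.filter q).foldl (fun a t => a + t.2) 0, m ++ (l.filter q).map (fun t => t.1)) := by
  induction l generalizing s m with
  | nil => simp
  | cons h tl ih =>
    by_cases hq : q h
    · simp only [List.foldl_cons, hq, if_pos, List.filter_cons_of_pos hq, List.map_cons]
      rw [ih, pv_foldl_add_shift _ (0 + h.2), Prod.mk.injEq]
      exact ⟨by ring, by simp⟩
    · simp only [List.foldl_cons, hq, if_neg, List.filter_cons_of_neg, Bool.not_eq_true]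
      exact ih s m

-- every generated slice is a substring of the text
theorem pv_slice_infix (text : String) (L : Nat) (i : Int)
    (hi : i ∈ PySem.List.pyRange 0 ((text.length : Int) - (L : Int) + 1) 1) :
    PySem.Str.isIn (PySem.Str.slice text (some i) (some (i + (L : Int)))) text = true := by
  rw [PySem.Str.isIn_iff_infix]
  obtain ⟨h0, _⟩ := (PySem.List.mem_pyRange_one).1 hi
  obtain ⟨n, rfl⟩ := Int.eq_ofNat_of_zero_le h0
  have hts : (PySem.Str.slice text (some (n : Int)) (some ((n : Int) + (L : Int)))).toList
      = (text.toList.drop n).take L := by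
    simp only [PySem.Str.toList_slice, PySem.Chars.slice_eq_listSlice, PySem.List.slice_natCast_add]
  rw [hts]
  obtain ⟨r, hr⟩ := List.take_prefix L (text.toList.drop n)
  obtain ⟨l, hl⟩ := List.drop_suffix n text.toList
  exact ⟨l, r, by rw [List.append_assoc, hr, hl]⟩

-- conversely, a phrase occurring in the text is among the generated slices of its length
theorem pv_infix_mem (text p : String) (h : PySem.Str.isIn p text = true) :
    ∃ i ∈ PySem.List.pyRange 0 ((text.length : Int) - (p.length : Int) + 1) 1,
      PySem.Str.slice text (some i) (some (i + (p.length : Int))) = p := by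
  rw [PySem.Str.isIn_iff_infix] at h
  obtain ⟨pre, suf, hps⟩ := h
  refine ⟨(pre.length : Int), ?_, ?_⟩
  · rw [PySem.List.mem_pyRange_one]
    have hlen : pre.length + (p.length + suf.length) = text.length := by
      simpa using congrArg List.length hps
    refine ⟨by positivity, by omega⟩
  · have hts : (PySem.Str.slice text (some (pre.length : Int)) (some ((pre.length : Int) + (p.length : Int)))).toList
        = (text.toList.drop pre.length).take p.length := by
      simp only [PySem.Str.toList_slice, PySem.Chars.slice_eq_listSlice, PySem.List.slice_natCast_add]
    have : (PySem.Str.slice text (some (pre.length : Int)) (some ((pre.length : Int) + (p.length : Int)))).toList = p.toList := by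
      rw [hts, ← hps, List.append_assoc, List.drop_left, List.take_left' p.length_toList]
    exact String.toList_inj.1 this

-- the membership test B uses agrees with A's substring test
theorem pv_contains_eq (text : String) (terms : List (String × Int)) (t : String × Int)
    (ht : t ∈ terms) :
    (PySem.Set.ofList ((PySem.List.dedup (terms.map (fun t => t.1.length))).flatMap (fun (L : Nat) =>
        (PySem.List.pyRange 0 ((text.length : Int) - (L : Int) + 1) 1).map
          (fun i => PySem.Str.slice text (some i) (some (i + (L : Int))))))).contains t.1
      = PySem.Str.isIn t.1 text := by
  rw [Bool.eq_iff_iff, PySem.Set.contains_iff, PySem.Set.mem_ofList, List.mem_flatMap]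
  constructor
  · rintro ⟨L, _, hmem⟩
    obtain ⟨i, hi, hs⟩ := List.mem_map.1 hmem
    rw [← hs]
    exact pv_slice_infix text L i hi
  · intro h
    obtain ⟨i, hi, hs⟩ := pv_infix_mem text t.1 h
    refine ⟨t.1.length, ?_, List.mem_map.2 ⟨i, hi, hs⟩⟩
    rw [PySem.List.dedup_eq_ofList, PySem.Set.mem_ofList]
    exact List.mem_map.2 ⟨t, ht, rfl⟩

-- ===== VERDICT (by name: the statement is the Claim_ definition above) =====
theorem collect_matches_py_spec : Claim_equal_collect_matches_py := by
  intro text terms _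
  unfold Spec_collect_matches_py collect_matches_py collect_matches_py_alt
  rw [pv_foldA]
  simp only []
  have hfc : terms.filter (fun t =>
      (PySem.Set.ofList ((PySem.List.dedup (terms.map (fun t => t.1.length))).flatMap (fun (L : Nat) =>
        (PySem.List.pyRange 0 ((text.length : Int) - (L : Int) + 1) 1).map
          (fun i => PySem.Str.slice text (some i) (some (i + (L : Int))))))).contains t.1)
      = terms.filter (fun t => PySem.Str.isIn t.1 text) := by
    apply List.filter_congr
    intro t ht
    exact pv_contains_eq text terms t ht
  rw [hfc]
  simp
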